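-- pv_equiv track=rewrite | github.com/r3ds3ctor/dict-maker | dict_maker.py | calculate_number_of_permutations
-- ===== SOURCE A (Python) =====
-- import itertools
--
-- def calculate_number_of_permutations(word, special_chars, digits, add_to_start, add_to_end):
--     base_permutations = 2 ** len(word)  # Each letter can be uppercase or lowercase
--
--     # Generate special character combinations (1 to 2 max)
--     special_combinations = [''] + list(special_chars) + [''.join(comb) for comb in itertools.combinations_with_replacement(special_chars, 2)]
--
--     # Generate all digit combinations (1 to 4 digits)
--     digit_permutations = [str(i) for i in range(10)]  # Single digits (0-9)
--     digit_permutations += [str(i).zfill(2) for i in range(10, 100)]  # Two-digit numbers (00-99)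
--     digit_permutations += [str(i).zfill(3) for i in range(100, 1000)]  # Three-digit numbers (000-999)
--     digit_permutations += [str(i) for i in range(1000, 10000)]  # Four-digit numbers (0000-9999)
--
--     # Generate full permutations of numbers + special characters
--     combined_suffixes = digit_permutations + [d + s for d in digit_permutations for s in special_combinations]
--
--     start_combinations = len(combined_suffixes) if add_to_start else 1
--     end_combinations = len(combined_suffixes) if add_to_end else 1
--
--     return base_permutations * start_combinations * end_combinations
-- ===== SOURCE B (Python) =====
-- def calculate_number_of_permutations(word, special_chars, digits, add_to_start, add_to_end):
--     # Closed form: A's special_combinations list has 1 + k + k*(k+1)//2 entries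
--     # (empty, singles, 2-multicombinations) and its digit list has exactly 10000
--     # entries, so combined_suffixes has 10000 * (2 + k + k*(k+1)//2) entries.
--     k = len(special_chars)
--     suffixes = 10000 * (2 + k + k * (k + 1) // 2)
--     result = 2 ** len(word)
--     if add_to_start:
--         result *= suffixes
--     if add_to_end:
--         result *= suffixes
--     return result
-- ===== Notes on version B (the rewrite author's own statement) =====
-- stated objective: faster
-- what changed: Replaces the construction of the 10000-entry digit list, the special-character combination list and their full product (tens of thousands of string concatenations) by a closed-form count 10000*(2+k+k*(k+1)//2) with k=len(special_chars), multiplied arithmetically.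
import Mathlib
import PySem

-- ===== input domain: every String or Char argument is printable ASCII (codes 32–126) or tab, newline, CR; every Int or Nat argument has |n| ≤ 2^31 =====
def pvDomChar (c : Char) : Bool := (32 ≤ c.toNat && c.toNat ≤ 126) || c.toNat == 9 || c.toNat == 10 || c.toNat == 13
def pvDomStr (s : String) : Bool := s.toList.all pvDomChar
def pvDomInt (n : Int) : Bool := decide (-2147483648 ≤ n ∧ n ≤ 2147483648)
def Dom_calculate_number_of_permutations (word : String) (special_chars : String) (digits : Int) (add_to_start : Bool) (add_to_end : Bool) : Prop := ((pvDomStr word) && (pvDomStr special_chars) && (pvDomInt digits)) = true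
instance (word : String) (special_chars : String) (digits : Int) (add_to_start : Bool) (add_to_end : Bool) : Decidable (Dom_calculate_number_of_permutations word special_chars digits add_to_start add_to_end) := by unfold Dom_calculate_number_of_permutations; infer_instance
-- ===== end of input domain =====

-- ===== PORT A =====
-- B replaces A's explicit list construction by the closed-form count; objective: faster (asymptotic).

-- itertools.combinations_with_replacement(l, 2), each pair already joined (''.join(comb)):
-- yields [l[i], l[j]] for i ≤ j in lexicographic index order, exactly as itertools does.
def pvCwr2 : List Char → List (List Char)
  | [] => []
  | c :: t => (c :: t).map (fun x => [c, x]) ++ pvCwr2 t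

-- str.zfill(w): pad with leading '0' to width w, keeping a leading sign; exact hand port.
def pvZfill (s : List Char) (w : Nat) : List Char :=
  match s with
  | c :: t =>
      if c = '+' ∨ c = '-' then c :: (List.replicate (w - (t.length + 1)) '0' ++ t)
      else List.replicate (w - (t.length + 1)) '0' ++ (c :: t)
  | [] => List.replicate w '0'

def calculate_number_of_permutations (word : String) (special_chars : String) (digits : Int) (add_to_start : Bool) (add_to_end : Bool) : Int :=
  let base_permutations : Int := 2 ^ word.toList.length
  let special_combinations : List (List Char) :=
    [[]] ++ special_chars.toList.map (fun c => [c]) ++ pvCwr2 special_chars.toList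
  let digit_permutations : List (List Char) :=
    ((PySem.List.pyRange 0 10 1).map (fun i => PySem.Int.toChars i))
    ++ ((PySem.List.pyRange 10 100 1).map (fun i => pvZfill (PySem.Int.toChars i) 2))
    ++ ((PySem.List.pyRange 100 1000 1).map (fun i => pvZfill (PySem.Int.toChars i) 3))
    ++ ((PySem.List.pyRange 1000 10000 1).map (fun i => PySem.Int.toChars i))
  let combined_suffixes : List (List Char) :=
    digit_permutations ++ digit_permutations.flatMap (fun d => special_combinations.map (fun s => d ++ s))
  let start_combinations : Int := if add_to_start then (combined_suffixes.length : Int) else 1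
  let end_combinations : Int := if add_to_end then (combined_suffixes.length : Int) else 1
  base_permutations * start_combinations * end_combinations

-- ===== PORT B =====
def calculate_number_of_permutations_alt (word : String) (special_chars : String) (digits : Int) (add_to_start : Bool) (add_to_end : Bool) : Int :=
  let k : Int := special_chars.toList.length
  let suffixes : Int := 10000 * (2 + k + PySem.Int.floordiv (k * (k + 1)) 2)
  let result : Int := 2 ^ word.toList.length
  let result : Int := if add_to_start then result * suffixes else result
  let result : Int := if add_to_end then result * suffixes else result
  result

-- ===== PRECONDITION & SPEC =====
def Spec_calculate_number_of_permutations (word : String) (special_chars : String) (digits : Int) (add_to_start : Bool) (add_to_end : Bool) (out : Int) : Prop := out = calculate_number_of_permutations_alt word special_chars digits add_to_start add_to_end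
instance (word : String) (special_chars : String) (digits : Int) (add_to_start : Bool) (add_to_end : Bool) (out : Int) : Decidable (Spec_calculate_number_of_permutations word special_chars digits add_to_start add_to_end out) := by unfold Spec_calculate_number_of_permutations; infer_instance

-- ===== CLAIM (what is proved, stated in full; the proofs are below) =====
def Claim_equal_calculate_number_of_permutations : Prop := ∀ (word : String) (special_chars : String) (digits : Int) (add_to_start : Bool) (add_to_end : Bool), Dom_calculate_number_of_permutations word special_chars digits add_to_start add_to_end → Spec_calculate_number_of_permutations word special_chars digits add_to_start add_to_end (calculate_number_of_permutations word special_chars digits add_to_start add_to_end)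

-- ===== LEMMAS AND PROOFS =====
theorem pvCwr2_length (l : List Char) : (pvCwr2 l).length * 2 = l.length * (l.length + 1) := by
  induction l with
  | nil => simp [pvCwr2]
  | cons c t ih => simp [pvCwr2]; nlinarith [ih]

theorem pv_key (word special_chars : String) (digits : Int) (add_to_start add_to_end : Bool) :
    calculate_number_of_permutations word special_chars digits add_to_start add_to_end
      = calculate_number_of_permutations_alt word special_chars digits add_to_start add_to_end := by
  unfold calculate_number_of_permutations calculate_number_of_permutations_alt
  have hfd : PySem.Int.floordiv ((special_chars.toList.length : Int) * ((special_chars.toList.length : Int) + 1)) 2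
      = ((pvCwr2 special_chars.toList).length : Int) := by
    rw [PySem.Int.floordiv_eq_ediv_of_pos (by omega)]
    have h2 : ((pvCwr2 special_chars.toList).length : Int) * 2
        = (special_chars.toList.length : Int) * ((special_chars.toList.length : Int) + 1) := by
      exact_mod_cast pvCwr2_length special_chars.toList
    rw [← h2, mul_comm]
    exact Int.mul_ediv_cancel_left _ (by omega)
  simp only [List.length_append, List.length_map, List.length_flatMap,
    PySem.List.length_pyRange_one, List.map_const', List.sum_replicate, smul_eq_mul,
    List.length_cons, List.length_nil, hfd]
  cases add_to_start <;> cases add_to_end <;>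
    simp only [if_true, if_false, Bool.false_eq_true] <;> push_cast <;> norm_num <;> ring

-- ===== VERDICT (by name: the statement is the Claim_ definition above) =====
theorem calculate_number_of_permutations_spec : Claim_equal_calculate_number_of_permutations := by
  intro word special_chars digits a e _
  unfold Spec_calculate_number_of_permutations
  exact pv_key word special_chars digits a e
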